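-- pv_equiv track=rewrite | github.com/highmore9501/fretDance | src/midi/midiToNote.py | compressNotes
-- ===== SOURCE A (Python) =====
-- from typing import List
--
-- def compressNotes(chordNotes: List[int], min: int = 36, max: int = 88) -> List[int]:
--     """
--     :param chordNotes: input notes. 输入音符
--     :param min: minimum note on guitar. 吉他上的最低音符
--     :param max: maximum note on guitar. 吉他上的最高音符
--     :return: compressed notes. 压缩后的音符
--     """
--     newChord = []
--     for note in chordNotes:
--         while note < min:
--             note += 12
--         while note > max:
--             note -= 12
--         if note not in newChord:
--             newChord.append(note)
--     result = sorted(newChord)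
--
--     return result
-- ===== SOURCE B (Python) =====
-- from typing import List
--
-- def compressNotes(chordNotes: List[int], min: int = 36, max: int = 88) -> List[int]:
--     folded = set()
--     for note in chordNotes:
--         if note < min:
--             note += 12 * ((min - note + 11) // 12)
--         if note > max:
--             note -= 12 * ((note - max + 11) // 12)
--         folded.add(note)
--     return sorted(folded)
-- ===== Notes on version B (the rewrite author's own statement) =====
-- stated objective: faster
-- what changed: Replaces the two inner while loops that step by 12 with closed-form ceiling-division arithmetic computing each shift in one step, and dedupes via a set instead of a linear membership scan on a list.
import Mathlib
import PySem

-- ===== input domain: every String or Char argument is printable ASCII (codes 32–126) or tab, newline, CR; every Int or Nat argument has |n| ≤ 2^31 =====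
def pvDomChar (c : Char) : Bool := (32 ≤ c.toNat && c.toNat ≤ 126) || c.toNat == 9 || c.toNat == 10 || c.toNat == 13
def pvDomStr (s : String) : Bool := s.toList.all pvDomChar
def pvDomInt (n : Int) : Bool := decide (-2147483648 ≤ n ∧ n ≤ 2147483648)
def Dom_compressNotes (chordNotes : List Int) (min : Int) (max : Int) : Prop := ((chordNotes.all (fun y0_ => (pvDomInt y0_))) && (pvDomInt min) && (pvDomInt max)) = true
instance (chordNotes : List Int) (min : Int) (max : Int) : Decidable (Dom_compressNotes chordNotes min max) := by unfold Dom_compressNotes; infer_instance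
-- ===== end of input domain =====

-- B replaces the per-note 12-stepping while loops with closed-form ceiling-division shifts and a set for dedup (objective: simpler).


-- ===== PORT A =====
-- 'while note < min: note += 12'
def pvShiftUp (note mn : Int) : Int :=
  if note < mn then pvShiftUp (note + 12) mn else note
termination_by (mn - note).toNat
decreasing_by omega

-- 'while note > max: note -= 12'
def pvShiftDown (note mx : Int) : Int :=
  if note > mx then pvShiftDown (note - 12) mx else note
termination_by (note - mx).toNat
decreasing_by omega

def compressNotes (chordNotes : List Int) (min : Int) (max : Int) : List Int :=
  let newChord := chordNotes.foldl (fun acc note =>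
    let n := pvShiftDown (pvShiftUp note min) max
    if n ∈ acc then acc else acc ++ [n]) []
  PySem.List.sorted newChord (fun x => x) false

-- ===== PORT B =====
def compressNotes_alt (chordNotes : List Int) (min : Int) (max : Int) : List Int :=
  let folded := chordNotes.foldl (fun s note =>
    let n1 := if note < min then note + 12 * PySem.Int.floordiv (min - note + 11) 12 else note
    let n2 := if n1 > max then n1 - 12 * PySem.Int.floordiv (n1 - max + 11) 12 else n1
    PySem.Set.add s n2) PySem.Set.empty
  PySem.List.sorted folded (fun x => x) false

-- ===== PRECONDITION & SPEC =====
def Spec_compressNotes (chordNotes : List Int) (min : Int) (max : Int) (out : List Int) : Prop := out = compressNotes_alt chordNotes min max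
instance (chordNotes : List Int) (min : Int) (max : Int) (out : List Int) : Decidable (Spec_compressNotes chordNotes min max out) := by unfold Spec_compressNotes; infer_instance

-- ===== CLAIM (what is proved, stated in full; the proofs are below) =====
def Claim_equal_compressNotes : Prop := ∀ (chordNotes : List Int) (min : Int) (max : Int), Dom_compressNotes chordNotes min max → Spec_compressNotes chordNotes min max (compressNotes chordNotes min max)

-- ===== LEMMAS AND PROOFS =====

theorem pvShiftUp_eq (note mn : Int) :
    pvShiftUp note mn =
      (if note < mn then note + 12 * PySem.Int.floordiv (mn - note + 11) 12 else note) := by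
  rw [pvShiftUp]
  by_cases h : note < mn
  · rw [if_pos h, if_pos h, pvShiftUp_eq (note + 12) mn]
    have h12 : (0:Int) < 12 := by norm_num
    by_cases h2 : note + 12 < mn
    · rw [if_pos h2,
        PySem.Int.floordiv_eq_ediv_of_pos h12,
        PySem.Int.floordiv_eq_ediv_of_pos h12]
      omega
    · rw [if_neg h2, PySem.Int.floordiv_eq_ediv_of_pos h12]
      omega
  · rw [if_neg h, if_neg h]
termination_by (mn - note).toNat
decreasing_by omega

theorem pvShiftDown_eq (note mx : Int) :
    pvShiftDown note mx =
      (if note > mx then note - 12 * PySem.Int.floordiv (note - mx + 11) 12 else note) := by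
  rw [pvShiftDown]
  by_cases h : note > mx
  · rw [if_pos h, if_pos h, pvShiftDown_eq (note - 12) mx]
    have h12 : (0:Int) < 12 := by norm_num
    by_cases h2 : note - 12 > mx
    · rw [if_pos h2,
        PySem.Int.floordiv_eq_ediv_of_pos h12,
        PySem.Int.floordiv_eq_ediv_of_pos h12]
      omega
    · rw [if_neg h2, PySem.Int.floordiv_eq_ediv_of_pos h12]
      omega
  · rw [if_neg h, if_neg h]
termination_by (note - mx).toNat
decreasing_by omega

theorem pvSetAdd_eq (s : List Int) (x : Int) :
    PySem.Set.add s x = if x ∈ s then s else s ++ [x] := by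
  simp [PySem.Set.add, PySem.Set.contains]

-- ===== VERDICT (by name: the statement is the Claim_ definition above) =====
theorem compressNotes_spec : Claim_equal_compressNotes := by
  intro chordNotes mn mx _
  unfold Spec_compressNotes compressNotes compressNotes_alt
  have hf : (fun (acc : List Int) (note : Int) =>
      let n := pvShiftDown (pvShiftUp note mn) mx
      if n ∈ acc then acc else acc ++ [n]) =
      (fun (s : List Int) (note : Int) =>
      let n1 := if note < mn then note + 12 * PySem.Int.floordiv (mn - note + 11) 12 else note
      let n2 := if n1 > mx then n1 - 12 * PySem.Int.floordiv (n1 - mx + 11) 12 else n1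
      PySem.Set.add s n2) := by
    funext acc note
    simp only [pvSetAdd_eq, pvShiftUp_eq, pvShiftDown_eq]
  simp only [hf, PySem.Set.empty]
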